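-- pv_equiv track=rewrite | github.com/stormtroober/GliNerBioMed-Label-SoftPrompt | softprompting/test_finetuned.py | extract_spans_from_word_seq
-- ===== SOURCE A (Python) =====
-- def extract_spans_from_word_seq(word_labels, background_label_id):
--     """
--     Dato un elenco di label word-level, estrae span contigui dello stesso label
--     (diverso da background_label_id) come set di tuple (start, end, label_id).
--     start/end sono indici 0-based INCLUSIVI sulle parole.
--     """
--     spans = set()
--     n = len(word_labels)
--     i = 0
--     while i < n:
--         lbl = word_labels[i]
--         if lbl != background_label_id:
--             j = i
--             while j < n and word_labels[j] == lbl: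
--                 j += 1
--             spans.add((i, j - 1, lbl))
--             i = j
--         else:
--             i += 1
--     return spans
-- ===== SOURCE B (Python) =====
-- def extract_spans_from_word_seq(word_labels, background_label_id):
--     """Single flat pass: track the current run's start and label and flush a
--     span whenever the label changes, with a final flush after the loop."""
--     spans = set()
--     start = None
--     cur = None
--     for k, lbl in enumerate(word_labels):
--         if cur is None or lbl != cur:
--             if cur is not None and cur != background_label_id:
--                 spans.add((start, k - 1, cur))
--             start, cur = k, lbl
--     if cur is not None and cur != background_label_id:
--         spans.add((start, len(word_labels) - 1, cur))
--     return spans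
-- ===== Notes on version B (the rewrite author's own statement) =====
-- stated objective: idiomatic
-- what changed: Replaced the index-driven while loop with an inner scan per run by a single enumerate pass that tracks the current run's start/label and flushes a span on each label change (plus a final flush).
import Mathlib
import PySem

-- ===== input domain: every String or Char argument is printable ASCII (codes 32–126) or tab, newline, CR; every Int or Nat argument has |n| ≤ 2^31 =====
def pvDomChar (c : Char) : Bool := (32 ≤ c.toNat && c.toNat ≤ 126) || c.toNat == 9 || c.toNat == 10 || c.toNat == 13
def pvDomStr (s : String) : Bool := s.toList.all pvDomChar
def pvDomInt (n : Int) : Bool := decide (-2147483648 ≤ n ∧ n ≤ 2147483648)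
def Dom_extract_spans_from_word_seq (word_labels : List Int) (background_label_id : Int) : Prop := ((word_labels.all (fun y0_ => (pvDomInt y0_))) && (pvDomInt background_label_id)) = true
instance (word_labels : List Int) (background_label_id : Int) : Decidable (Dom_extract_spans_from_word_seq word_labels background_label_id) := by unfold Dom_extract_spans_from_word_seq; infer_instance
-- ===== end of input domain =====

-- B replaces A's index-driven while loop (inner scan per run) by a single enumerate
-- pass tracking the current run's start/label with flush-on-change (objective: idiomatic).


-- ===== PORT A =====
-- inner while 'while j < n and word_labels[j] == lbl: j += 1'; the fuel argument is a
-- totality guard only (seeded with enough fuel, the guard never cuts the loop short)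
def aInner (wl : List Int) (lbl : Int) (fuel j : Nat) : Nat :=
  match fuel with
  | 0 => j
  | fuel' + 1 =>
    if h : j < wl.length then
      if wl[j] = lbl then aInner wl lbl fuel' (j + 1) else j
    else j

-- outer while over i, accumulating the set of spans (fuel is again only a totality guard;
-- lbl := word_labels[i] and j := inner-loop result are inlined)
def aLoop (wl : List Int) (bg : Int) (fuel i : Nat) (spans : List (Int × Int × Int)) :
    List (Int × Int × Int) :=
  match fuel with
  | 0 => spans
  | fuel' + 1 =>
    if h : i < wl.length then
      if wl[i] ≠ bg then
        aLoop wl bg fuel' (aInner wl wl[i] (wl.length - i) i)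
          (PySem.Set.add spans ((i : Int), ((aInner wl wl[i] (wl.length - i) i : Nat) : Int) - 1, wl[i]))
      else
        aLoop wl bg fuel' (i + 1) spans
    else spans

def extract_spans_from_word_seq (word_labels : List Int) (background_label_id : Int) :
    List (Int × Int × Int) :=
  aLoop word_labels background_label_id word_labels.length 0 []

-- ===== PORT B =====
-- one step of B's enumerate loop; state = (spans, current run as (start, label))
def bStep (bg : Int) (st : List (Int × Int × Int) × Option (Int × Int)) (p : Int × Int) :
    List (Int × Int × Int) × Option (Int × Int) :=
  match st.2 with
  | none => (st.1, some (p.1, p.2))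
  | some (start, cur) =>
      if p.2 ≠ cur then
        ((if cur ≠ bg then PySem.Set.add st.1 (start, p.1 - 1, cur) else st.1),
         some (p.1, p.2))
      else st

-- final flush after the loop, with inclusive end index
def bFin (bg : Int) (endIdx : Int) (st : List (Int × Int × Int) × Option (Int × Int)) :
    List (Int × Int × Int) :=
  match st.2 with
  | some (start, cur) =>
      if cur ≠ bg then PySem.Set.add st.1 (start, endIdx, cur) else st.1
  | none => st.1

def extract_spans_from_word_seq_alt (word_labels : List Int) (background_label_id : Int) :
    List (Int × Int × Int) :=
  bFin background_label_id ((word_labels.length : Int) - 1)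
    ((PySem.List.enumerate word_labels).foldl (bStep background_label_id) ([], none))

-- ===== PRECONDITION & SPEC =====
def Spec_extract_spans_from_word_seq (word_labels : List Int) (background_label_id : Int) (out : List (Int × Int × Int)) : Prop := out = extract_spans_from_word_seq_alt word_labels background_label_id
instance (word_labels : List Int) (background_label_id : Int) (out : List (Int × Int × Int)) : Decidable (Spec_extract_spans_from_word_seq word_labels background_label_id out) := by unfold Spec_extract_spans_from_word_seq; infer_instance

-- ===== CLAIM (what is proved, stated in full; the proofs are below) =====
def Claim_equal_extract_spans_from_word_seq : Prop := ∀ (word_labels : List Int) (background_label_id : Int), Dom_extract_spans_from_word_seq word_labels background_label_id → Spec_extract_spans_from_word_seq word_labels background_label_id (extract_spans_from_word_seq word_labels background_label_id)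

-- ===== LEMMAS AND PROOFS =====

-- reference: the spans of the runs of wl, with offsets starting at off
def refSpans (wl : List Int) (bg : Int) (off : Int) : List (Int × Int × Int) :=
  match wl with
  | [] => []
  | l :: t =>
      (if l ≠ bg then
        [(off, off + (((t.takeWhile (· == l)).length : Int) + 1) - 1, l)] else [])
        ++ refSpans (t.dropWhile (· == l)) bg (off + (((t.takeWhile (· == l)).length : Int) + 1))
termination_by wl.length
decreasing_by
  have := List.length_dropWhile_le (p := (· == l)) (l := t)
  simp only [List.length_cons]; omega

theorem set_add_notmem (s : List (Int × Int × Int)) (x : Int × Int × Int) (h : x ∉ s) :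
    PySem.Set.add s x = s ++ [x] := by
  simp [PySem.Set.add, PySem.Set.contains, h]

theorem aInner_eq (wl : List Int) (lbl : Int) :
    ∀ (fuel j : Nat), wl.length ≤ j + fuel →
      aInner wl lbl fuel j = j + ((wl.drop j).takeWhile (· == lbl)).length := by
  intro fuel
  induction fuel with
  | zero =>
      intro j hf
      rw [aInner, List.drop_eq_nil_of_le (by omega)]
      simp
  | succ fuel ih =>
      intro j hf
      rw [aInner]
      split
      · rename_i h
        rw [List.drop_eq_getElem_cons h]
        by_cases hl : wl[j] = lbl
        · rw [if_pos hl, ih (j + 1) (by omega), List.takeWhile_cons,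
            if_pos (by simpa using hl)]
          simp only [List.length_cons]
          omega
        · rw [if_neg hl, List.takeWhile_cons, if_neg (by simpa using hl)]
          simp
      · rename_i h
        rw [List.drop_eq_nil_of_le (by omega)]
        simp

theorem refSpans_skip_bg (bg : Int) (t : List Int) (off : Int) :
    refSpans t bg off
      = refSpans (t.dropWhile (· == bg)) bg (off + ((t.takeWhile (· == bg)).length : Int)) := by
  match t with
  | [] => simp [List.takeWhile_nil, List.dropWhile_nil]
  | a :: t' =>
      by_cases ha : a = bg
      · subst ha
        rw [List.dropWhile_cons, List.takeWhile_cons, if_pos (by simp), if_pos (by simp)]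
        rw [refSpans, if_neg (fun hn => hn rfl), List.nil_append]
        congr 1
      · rw [List.takeWhile_cons, List.dropWhile_cons,
          if_neg (by simpa using ha), if_neg (by simpa using ha)]
        simp

theorem refSpans_bg (bg : Int) (t : List Int) (off : Int) :
    refSpans (bg :: t) bg off = refSpans t bg (off + 1) := by
  rw [refSpans, if_neg (fun hn => hn rfl), List.nil_append,
    refSpans_skip_bg bg t (off + 1)]
  congr 1; ring

theorem aLoop_eq (wl : List Int) (bg : Int) :
    ∀ (fuel i : Nat) (spans : List (Int × Int × Int)), wl.length ≤ i + fuel →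
      (∀ q ∈ spans, q.1 < (i : Int)) →
      aLoop wl bg fuel i spans = spans ++ refSpans (wl.drop i) bg (i : Int) := by
  intro fuel
  induction fuel with
  | zero =>
      intro i spans hf hinv
      rw [aLoop, List.drop_eq_nil_of_le (by omega), refSpans]
      simp
  | succ fuel ih =>
      intro i spans hf hinv
      rw [aLoop]
      split
      · rename_i h
        have hdrop : wl.drop i = wl[i] :: wl.drop (i + 1) := List.drop_eq_getElem_cons h
        by_cases hbg : wl[i] = bg
        · rw [if_neg (fun hn => hn hbg)]
          rw [ih (i + 1) spans (by omega)
            (fun q hq => by have := hinv q hq; push_cast; omega)]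
          rw [hdrop, hbg, refSpans_bg bg (wl.drop (i + 1)) (i : Int)]
          congr 2
        · rw [if_pos hbg]
          set tw := (wl.drop (i + 1)).takeWhile (· == wl[i]) with htw
          set dw := (wl.drop (i + 1)).dropWhile (· == wl[i]) with hdwdef
          have hje : aInner wl wl[i] (wl.length - i) i = i + 1 + tw.length := by
            rw [aInner_eq wl wl[i] (wl.length - i) i (by omega), hdrop,
              List.takeWhile_cons, if_pos (by simp)]
            simp only [List.length_cons, htw]
            omega
          have hx : ((i : Int), ((aInner wl wl[i] (wl.length - i) i : Nat) : Int) - 1, wl[i]) ∉ spans := by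
            intro hmem; have := hinv _ hmem; simp at this
          rw [set_add_notmem spans _ hx]
          rw [ih (aInner wl wl[i] (wl.length - i) i) _ (by omega)
            (by intro q hq
                rcases List.mem_append.mp hq with h1 | h1
                · have h2 := hinv q h1
                  omega
                · simp only [List.mem_singleton] at h1
                  subst h1
                  show (i : Int) < _
                  omega)]
          have hdw : wl.drop (aInner wl wl[i] (wl.length - i) i) = dw := by
            have h1 : List.drop tw.length (wl.drop (i + 1)) = wl.drop (aInner wl wl[i] (wl.length - i) i) := by
              rw [List.drop_drop]; congr 1; omega
            have h2 : List.drop tw.length (wl.drop (i + 1)) = dw := by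
              conv_lhs =>
                rw [show wl.drop (i + 1) = tw ++ dw from
                  (List.takeWhile_append_dropWhile (p := (· == wl[i])) (l := wl.drop (i + 1))).symm]
              rw [List.drop_left]
            rw [← h1, h2]
          conv_rhs => rw [hdrop, refSpans]
          rw [if_pos (by simpa using hbg), ← htw, ← hdwdef, hdw]
          have hcast : ((aInner wl wl[i] (wl.length - i) i : Nat) : Int) = (i : Int) + ((tw.length : Int) + 1) := by
            omega
          rw [hcast]
          simp only [List.append_assoc]
      · rename_i h
        rw [List.drop_eq_nil_of_le (by omega)]
        rw [refSpans]
        simp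

theorem bRun (bg : Int) (t : List Int) (k start cur : Int) (spans : List (Int × Int × Int))
    (hinv : ∀ q ∈ spans, q.1 < start) (hsk : start < k) :
    bFin bg (k + (t.length : Int) - 1)
        ((PySem.List.enumerate t k).foldl (bStep bg) (spans, some (start, cur)))
      = spans
        ++ (if cur ≠ bg then
              [(start, k + ((t.takeWhile (· == cur)).length : Int) - 1, cur)] else [])
        ++ refSpans (t.dropWhile (· == cur)) bg (k + ((t.takeWhile (· == cur)).length : Int)) := by
  match t with
  | [] =>
      rw [PySem.List.enumerate_nil, List.foldl_nil]
      rw [List.takeWhile_nil, List.dropWhile_nil]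
      by_cases hc : cur = bg
      · rw [if_neg (fun hn => hn hc)]
        simp [bFin, hc, refSpans]
      · rw [if_pos hc]
        have hx : (start, k + ((0 : Int)) - 1, cur) ∉ spans := by
          intro hmem; have h2 := hinv _ hmem; simp at h2
        show bFin bg (k + ((0:Nat) : Int) - 1) (spans, some (start, cur)) = _
        rw [show bFin bg (k + ((0:Nat) : Int) - 1) (spans, some (start, cur))
            = if cur ≠ bg then PySem.Set.add spans (start, k + ((0:Nat):Int) - 1, cur) else spans
          from rfl]
        rw [if_pos hc, set_add_notmem spans _ (by simpa using hx)]
        rw [refSpans]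
        simp
  | a :: t' =>
      rw [PySem.List.enumerate_cons, List.foldl_cons]
      have hlen : k + (((a :: t').length : Nat) : Int) - 1 = (k + 1) + ((t'.length : Nat) : Int) - 1 := by
        simp only [List.length_cons]; push_cast; ring
      rw [hlen]
      by_cases hac : a = cur
      · subst hac
        have hstep : bStep bg (spans, some (start, a)) (k, a) = (spans, some (start, a)) := by
          simp [bStep]
        rw [hstep, bRun bg t' (k + 1) start a spans hinv (by omega)]
        rw [List.takeWhile_cons, List.dropWhile_cons,
          if_pos (show (a == a) = true by simp), if_pos (show (a == a) = true by simp)]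
        simp only [List.length_cons]
        have e1 : (k + 1) + ((t'.takeWhile (· == a)).length : Int) - 1
            = k + ((((t'.takeWhile (· == a)).length + 1 : Nat)) : Int) - 1 := by push_cast; ring
        have e2 : (k + 1) + ((t'.takeWhile (· == a)).length : Int)
            = k + ((((t'.takeWhile (· == a)).length + 1 : Nat)) : Int) := by push_cast; ring
        rw [e1, e2]
      · have hstep : bStep bg (spans, some (start, cur)) (k, a)
            = ((if cur ≠ bg then PySem.Set.add spans (start, k - 1, cur) else spans),
               some (k, a)) := by
          simp [bStep, hac]
        have hspans' : (if cur ≠ bg then PySem.Set.add spans (start, k - 1, cur) else spans)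
            = spans ++ (if cur ≠ bg then [(start, k - 1, cur)] else []) := by
          by_cases hc : cur = bg
          · rw [if_neg (fun hn => hn hc), if_neg (fun hn => hn hc)]
            simp
          · rw [if_pos hc, if_pos hc,
              set_add_notmem spans _ (by intro hmem; have h2 := hinv _ hmem; simp at h2)]
        rw [hstep, hspans']
        rw [bRun bg t' (k + 1) k a (spans ++ (if cur ≠ bg then [(start, k - 1, cur)] else []))
          (by intro q hq
              rcases List.mem_append.mp hq with h1 | h1
              · have := hinv q h1; omega
              · by_cases hc : cur = bg
                · rw [if_neg (fun hn => hn hc)] at h1; simp at h1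
                · rw [if_pos hc] at h1
                  simp only [List.mem_singleton] at h1
                  subst h1; omega)
          (by omega)]
        rw [List.takeWhile_cons, List.dropWhile_cons,
          if_neg (show ¬((a == cur) = true) by simpa using hac),
          if_neg (show ¬((a == cur) = true) by simpa using hac)]
        simp only [List.length_nil, Int.natCast_zero, add_zero]
        rw [refSpans]
        have e1 : (k + 1) + ((t'.takeWhile (· == a)).length : Int) - 1
            = k + (((t'.takeWhile (· == a)).length : Int) + 1) - 1 := by ring
        have e2 : (k + 1) + ((t'.takeWhile (· == a)).length : Int)
            = k + (((t'.takeWhile (· == a)).length : Int) + 1) := by ring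
        rw [e1, e2]
        simp [List.append_assoc]

theorem a_eq_ref (wl : List Int) (bg : Int) :
    extract_spans_from_word_seq wl bg = refSpans wl bg 0 := by
  rw [extract_spans_from_word_seq, aLoop_eq wl bg wl.length 0 [] (by omega) (by simp)]
  simp

theorem b_eq_ref (wl : List Int) (bg : Int) :
    extract_spans_from_word_seq_alt wl bg = refSpans wl bg 0 := by
  match wl with
  | [] =>
      rw [extract_spans_from_word_seq_alt, PySem.List.enumerate_nil, List.foldl_nil]
      rw [refSpans]
      simp [bFin]
  | l :: t =>
      rw [extract_spans_from_word_seq_alt, PySem.List.enumerate_cons, List.foldl_cons]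
      have h0 : bStep bg ([], none) ((0 : Int), l) = ([], some ((0 : Int), l)) := by
        simp [bStep]
      have hlen : (((l :: t).length : Nat) : Int) - 1 = ((0 : Int) + 1) + ((t.length : Nat) : Int) - 1 := by
        simp only [List.length_cons]; push_cast; ring
      rw [h0, hlen, bRun bg t ((0 : Int) + 1) 0 l [] (by simp) (by omega)]
      rw [refSpans]
      simp only [List.nil_append]
      have e1 : ((0 : Int) + 1) + ((t.takeWhile (· == l)).length : Int) - 1
          = (0 : Int) + (((t.takeWhile (· == l)).length : Int) + 1) - 1 := by ring
      have e2 : ((0 : Int) + 1) + ((t.takeWhile (· == l)).length : Int)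
          = (0 : Int) + (((t.takeWhile (· == l)).length : Int) + 1) := by ring
      rw [e1, e2]

-- ===== VERDICT (by name: the statement is the Claim_ definition above) =====
theorem extract_spans_from_word_seq_spec : Claim_equal_extract_spans_from_word_seq := by
  intro wl bg _
  unfold Spec_extract_spans_from_word_seq
  rw [a_eq_ref, b_eq_ref]
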